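-- pv_equiv track=rewrite | github.com/MislavJaksic/Practice-Python | practice_python/other/aardvark_lessons.py | earliest_unique_elements
-- ===== SOURCE A (Python) =====
-- def earliest_unique_elements(list, max):  # count and remember how many uniques you've already seen
--     uniques = {}
--     for x in range(max+1):
--         uniques[x] = True
--     for count in range(len(list)):
--         number = list[count]
--         if uniques.get(number):
--             uniques[number] = False
--             max -= 1
--             if max == 0:
--                 return count
--     return -1
-- ===== SOURCE B (Python) =====
-- def earliest_unique_elements(list, max):
--     # Build-table-then-select: record the first-occurrence index of each value
--     # that is an integer in range(max+1), then pick the max-th such index.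
--     first = {}
--     for i, x in enumerate(list):
--         if x in range(max + 1) and x not in first:
--             first[x] = i
--     positions = sorted(first.values())
--     if max > 0 and len(positions) >= max:
--         return positions[max - 1]
--     return -1
-- ===== Notes on version B (the rewrite author's own statement) =====
-- stated objective: alternative
-- what changed: Replaces A's pre-built boolean dict over range(max+1) and its early-return countdown loop by a single enumerate pass recording first-occurrence indices of in-range values, followed by sorting those indices and selecting the max-th one.
import Mathlib
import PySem

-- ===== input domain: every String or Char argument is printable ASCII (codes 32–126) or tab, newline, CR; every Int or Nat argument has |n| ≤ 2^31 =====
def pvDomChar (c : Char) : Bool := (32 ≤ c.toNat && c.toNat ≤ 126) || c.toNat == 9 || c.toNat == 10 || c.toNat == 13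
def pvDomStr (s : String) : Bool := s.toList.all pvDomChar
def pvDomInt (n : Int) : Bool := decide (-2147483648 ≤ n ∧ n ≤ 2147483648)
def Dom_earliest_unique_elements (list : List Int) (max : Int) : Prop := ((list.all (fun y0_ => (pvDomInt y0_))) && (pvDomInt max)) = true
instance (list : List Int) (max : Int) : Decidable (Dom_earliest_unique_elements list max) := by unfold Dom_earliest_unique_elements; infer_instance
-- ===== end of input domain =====

-- B replaces A's pre-marked dict + countdown scan by "record first-occurrence indices, sort, select";
-- same return value on every input (alternative decomposition, no speed claim).

-- ===== PORT A =====
-- the 'for count in range(len(list))' loop with early return, ported as structural recursion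
-- carrying the index 'count' (number = list[count] is the head of the remaining list).
-- 'uniques' is ported as Std.HashMap (a hash dict, like CPython's): with int keys its
-- get?/insert agree with Python's dict exactly, and #eval stays feasible for large max
def euLoopA : List Int → Int → Std.HashMap Int Bool → Int → Int
  | [], _, _, _ => -1
  | x :: xs, count, uniques, max =>
    if (uniques.get? x).getD false then      -- uniques.get(number) truthy (None/False falsy)
      let uniques' := uniques.insert x false
      let max' := max - 1
      if max' = 0 then count else euLoopA xs (count + 1) uniques' max'
    else euLoopA xs (count + 1) uniques max

def earliest_unique_elements (list : List Int) (max : Int) : Int :=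
  let uniques := (PySem.List.pyRange 0 (max + 1) 1).foldl (fun d x => d.insert x true) Std.HashMap.emptyWithCapacity
  euLoopA list 0 uniques max

-- ===== PORT B =====
def earliest_unique_elements_alt (list : List Int) (max : Int) : Int :=
  let first := (PySem.List.enumerate list 0).foldl
    (fun d p => if 0 ≤ p.2 ∧ p.2 < max + 1 ∧ d.contains p.2 = false then d.insert p.2 p.1 else d)
    PySem.Dict.empty
  let positions := PySem.List.sorted (PySem.Dict.values first) (fun v => v) false
  if 0 < max ∧ max ≤ (positions.length : Int) then
    (PySem.List.pyGet? positions (max - 1)).getD (-1)   -- index provably in range under the guard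
  else -1

-- ===== PRECONDITION & SPEC =====
def Spec_earliest_unique_elements (list : List Int) (max : Int) (out : Int) : Prop := out = earliest_unique_elements_alt list max
instance (list : List Int) (max : Int) (out : Int) : Decidable (Spec_earliest_unique_elements list max out) := by unfold Spec_earliest_unique_elements; infer_instance

-- ===== CLAIM (what is proved, stated in full; the proofs are below) =====
def Claim_equal_earliest_unique_elements : Prop := ∀ (list : List Int) (max : Int), Dom_earliest_unique_elements list max → Spec_earliest_unique_elements list max (earliest_unique_elements list max)

-- ===== LEMMAS AND PROOFS =====

-- reference scan: indices of first occurrences of values in range(M+1), given already-seen values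
def euHits (M : Int) : List Int → Int → List Int → List Int
  | [], _, _ => []
  | x :: xs, i, seen =>
    if 0 ≤ x ∧ x < M + 1 ∧ x ∉ seen then i :: euHits M xs (i + 1) (x :: seen)
    else euHits M xs (i + 1) seen

theorem euGet_foldl_insert_true (l : List Int) (d : Std.HashMap Int Bool) (y : Int) :
    ((l.foldl (fun d x => d.insert x true) d).get? y) = if y ∈ l then some true else d.get? y := by
  induction l generalizing d with
  | nil => simp
  | cons a l ih =>
    simp only [List.foldl_cons, ih, Std.HashMap.get?_eq_getElem?, Std.HashMap.getElem?_insert,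
      List.mem_cons]
    by_cases h : y ∈ l
    · simp [h]
    · by_cases h2 : a = y
      · simp [h, h2]
      · simp [h, h2, Ne.symm h2]

theorem euPyGet?_none_of_ge {α : Type} (l : List α) (k : Int) (h : (l.length : Int) ≤ k) :
    PySem.List.pyGet? l k = none := by
  rw [PySem.List.pyGet?_eq_none_iff]
  unfold PySem.Raise.InRange
  omega

theorem euPyGet?_cons_of_one_le {α : Type} (a : α) (l : List α) (k : Int) (hk : 1 ≤ k) :
    PySem.List.pyGet? (a :: l) k = PySem.List.pyGet? l (k - 1) := by
  rw [PySem.List.pyGet?_of_nonneg _ (by omega), PySem.List.pyGet?_of_nonneg _ (by omega)]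
  have hkk : k.toNat = (k - 1).toNat + 1 := by omega
  rw [hkk]
  simp

theorem euLoopA_nonpos (xs : List Int) (count : Int) (d : Std.HashMap Int Bool) (m : Int) (hm : m ≤ 0) :
    euLoopA xs count d m = -1 := by
  induction xs generalizing count d m with
  | nil => rfl
  | cons x xs ih =>
    simp only [euLoopA]
    split
    · rw [if_neg (by omega)]; exact ih _ _ _ (by omega)
    · exact ih _ _ _ hm

theorem euLoopA_eq_hits (M : Int) (xs : List Int) (count m : Int) (d : Std.HashMap Int Bool)
    (seen : List Int) (hm : 1 ≤ m)
    (hd : ∀ y, ((d.get? y).getD false = true) ↔ (0 ≤ y ∧ y < M + 1 ∧ y ∉ seen)) :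
    euLoopA xs count d m = (PySem.List.pyGet? (euHits M xs count seen) (m - 1)).getD (-1) := by
  induction xs generalizing count m d seen with
  | nil =>
    simp only [euLoopA, euHits]
    rw [euPyGet?_none_of_ge _ _ (by simp only [List.length_nil, Nat.cast_zero]; omega)]
    rfl
  | cons x xs ih =>
    simp only [euLoopA, euHits]
    by_cases hx : 0 ≤ x ∧ x < M + 1 ∧ x ∉ seen
    · rw [if_pos ((hd x).mpr hx), if_pos hx]
      by_cases h1 : m - 1 = 0
      · rw [if_pos h1]
        have hm1 : m = 1 := by omega
        subst hm1
        simp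
      · rw [if_neg h1]
        rw [ih (count + 1) (m - 1) (d.insert x false) (x :: seen) (by omega) ?_]
        · rw [euPyGet?_cons_of_one_le _ _ _ (by omega)]
        · intro y
          by_cases hy : y = x
          · subst hy
            simp [Std.HashMap.get?_eq_getElem?]
          · have hget : (d.insert x false).get? y = d.get? y := by
              simp [Std.HashMap.get?_eq_getElem?, Std.HashMap.getElem?_insert,
                show ¬ (x = y) from fun h => hy h.symm]
            rw [hget, hd y]
            simp only [List.mem_cons]
            constructor
            · rintro ⟨a, b, c⟩; exact ⟨a, b, by simp [hy, c]⟩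
            · rintro ⟨a, b, c⟩; exact ⟨a, b, fun hmem => c (Or.inr hmem)⟩
    · have hfalse : ¬ ((d.get? x).getD false = true) := fun h => hx ((hd x).mp h)
      rw [if_neg hfalse, if_neg hx]
      exact ih _ _ _ _ hm hd

theorem euA_eq (list : List Int) (max : Int) (h : 1 ≤ max) :
    earliest_unique_elements list max
      = (PySem.List.pyGet? (euHits max list 0 []) (max - 1)).getD (-1) := by
  show euLoopA list 0 _ max = _
  apply euLoopA_eq_hits max list 0 max _ [] h
  intro y
  rw [euGet_foldl_insert_true]
  by_cases hy : y ∈ PySem.List.pyRange 0 (max + 1) 1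
  · have := PySem.List.mem_pyRange_one.mp hy
    simp [hy, this.1, this.2]
  · rw [if_neg hy]
    simp only [Std.HashMap.get?_eq_getElem?, Std.HashMap.getElem?_emptyWithCapacity,
      Option.getD_none, List.not_mem_nil, not_false_iff, and_true]
    constructor
    · intro hcontra; cases hcontra
    · rintro ⟨h1, h2⟩
      exact absurd (PySem.List.mem_pyRange_one.mpr ⟨h1, h2⟩) hy

theorem euB_values (M : Int) (xs : List Int) (i : Int) (d : PySem.Dict Int Int) (seen : List Int)
    (hnd : d.keys.Nodup)
    (hc : ∀ y, d.contains y = decide (y ∈ seen)) :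
    ((PySem.List.enumerate xs i).foldl
      (fun d p => if 0 ≤ p.2 ∧ p.2 < M + 1 ∧ d.contains p.2 = false then d.insert p.2 p.1 else d)
      d).values
      = d.values ++ euHits M xs i seen := by
  induction xs generalizing i d seen with
  | nil => simp [PySem.List.enumerate_nil, euHits]
  | cons x xs ih =>
    rw [PySem.List.enumerate_cons]
    simp only [List.foldl_cons, euHits]
    by_cases hx : 0 ≤ x ∧ x < M + 1 ∧ x ∉ seen
    · have hcx : d.contains x = false := by rw [hc]; simp [hx.2.2]
      rw [if_pos ⟨hx.1, hx.2.1, hcx⟩, if_pos hx]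
      rw [ih (i + 1) (d.insert x i) (x :: seen) (PySem.Dict.nodup_keys_insert _ _ _ hnd) ?_]
      · have hv : (d.insert x i).values = d.values ++ [i] := by
          simp [PySem.Dict.values, PySem.Dict.items_insert_of_not_contains _ _ hcx]
        rw [hv, List.append_assoc]
        rfl
      · intro y
        rw [PySem.Dict.contains_insert, hc]
        by_cases hy : y = x <;> simp [hy]
    · have hcond : ¬ (0 ≤ x ∧ x < M + 1 ∧ d.contains x = false) := by
        rintro ⟨h1, h2, h3⟩
        rw [hc] at h3
        exact hx ⟨h1, h2, by simpa using h3⟩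
      rw [if_neg hcond, if_neg hx]
      exact ih _ _ _ hnd hc

theorem euHits_mono (M : Int) (xs : List Int) (i : Int) (seen : List Int) :
    (∀ j ∈ euHits M xs i seen, i ≤ j) ∧ (euHits M xs i seen).Pairwise (· < ·) := by
  induction xs generalizing i seen with
  | nil => simp [euHits]
  | cons x xs ih =>
    simp only [euHits]
    split
    · obtain ⟨hb, hp⟩ := ih (i + 1) (x :: seen)
      refine ⟨?_, ?_⟩
      · intro j hj
        rcases List.mem_cons.mp hj with h | h
        · omega
        · have := hb j h; omega
      · exact List.pairwise_cons.mpr ⟨fun j hj => by have := hb j hj; omega, hp⟩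
    · obtain ⟨hb, hp⟩ := ih (i + 1) seen
      exact ⟨fun j hj => by have := hb j hj; omega, hp⟩

theorem euB_eq (list : List Int) (max : Int) :
    earliest_unique_elements_alt list max
      = (if 0 < max ∧ max ≤ ((euHits max list 0 []).length : Int) then
          (PySem.List.pyGet? (euHits max list 0 []) (max - 1)).getD (-1)
        else -1) := by
  show (let positions := PySem.List.sorted _ (fun v => v) false
        if 0 < max ∧ max ≤ (positions.length : Int) then
          (PySem.List.pyGet? positions (max - 1)).getD (-1) else -1) = _
  have hv := euB_values max list 0 PySem.Dict.empty []
    (by simp) (by intro y; simp)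
  simp only [PySem.Dict.values] at hv ⊢
  rw [hv]
  rw [show ((PySem.Dict.empty : PySem.Dict Int Int).items.map (fun x => x.2)) = [] from rfl,
    List.nil_append]
  have hp : (euHits max list 0 []).Pairwise (fun a b => (fun v : Int => v) a ≤ (fun v : Int => v) b) :=
    (euHits_mono max list 0 []).2.imp (fun h => le_of_lt h)
  rw [PySem.List.sorted_eq_self_of_pairwise (euHits max list 0 []) (fun v => v) hp]

-- ===== VERDICT (by name: the statement is the Claim_ definition above) =====
theorem earliest_unique_elements_spec : Claim_equal_earliest_unique_elements := by
  intro list max _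
  unfold Spec_earliest_unique_elements
  rw [euB_eq]
  by_cases hpos : 1 ≤ max
  · rw [euA_eq list max hpos]
    by_cases hlen : max ≤ ((euHits max list 0 []).length : Int)
    · rw [if_pos ⟨by omega, hlen⟩]
    · rw [if_neg (by intro h; exact hlen h.2)]
      rw [euPyGet?_none_of_ge _ _ (by omega)]
      rfl
  · rw [if_neg (by intro h; omega)]
    show euLoopA list 0 _ max = -1
    exact euLoopA_nonpos _ _ _ _ (by omega)
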